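-- pv_equiv track=rewrite | github.com/jinguheo/my_verilog | platform/eval/build_multiaxis_benchmark.py | choose_pairs
-- ===== SOURCE A (Python) =====
-- def choose_pairs(modules):
--     pairs = []
--     for i in range(len(modules)):
--         for j in range(i + 1, len(modules)):
--             a, b = modules[i], modules[j]
--             if a["project"] == b["project"]:
--                 pairs.append((a, b))
--     return pairs
-- ===== SOURCE B (Python) =====
-- def choose_pairs(modules):
--     if len(modules) < 2:
--         return []
--     index = {}
--     for i, m in enumerate(modules):
--         p = m["project"]
--         index[p] = index.get(p, []) + [i]
--     pairs = []
--     for i, m in enumerate(modules):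
--         for j in index[m["project"]]:
--             if i < j:
--                 pairs.append((m, modules[j]))
--     return pairs
-- ===== Notes on version B (the rewrite author's own statement) =====
-- stated objective: alternative
-- what changed: Replaced the quadratic all-pairs double scan by first grouping module indices per project in a dict, then for each module visiting only the index list of its own project (skipping indices <= i), which reproduces the exact (i,j) order while never comparing modules of different projects.
import Mathlib
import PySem

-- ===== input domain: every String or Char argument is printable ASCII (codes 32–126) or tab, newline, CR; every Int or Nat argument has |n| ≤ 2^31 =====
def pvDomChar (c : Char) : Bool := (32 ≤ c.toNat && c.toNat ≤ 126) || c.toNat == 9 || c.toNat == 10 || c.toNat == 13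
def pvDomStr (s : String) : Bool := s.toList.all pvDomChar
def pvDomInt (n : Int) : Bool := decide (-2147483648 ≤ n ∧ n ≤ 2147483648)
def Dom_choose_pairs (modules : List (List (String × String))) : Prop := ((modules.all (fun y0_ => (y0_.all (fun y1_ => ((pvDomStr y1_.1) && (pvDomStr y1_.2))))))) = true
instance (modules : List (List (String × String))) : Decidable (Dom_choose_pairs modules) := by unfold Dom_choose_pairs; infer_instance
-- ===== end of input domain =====

-- B groups module indices per project in a dict and only visits same-project partners (instead of A's all-pairs double scan); return value proved equal to A's on Pre_.

-- ===== PORT A =====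
def choose_pairs (modules : List (List (String × String))) : List ((List (String × String)) × (List (String × String))) :=
  (PySem.List.pyRange 0 (modules.length : Int) 1).foldl (fun pairs i =>
    (PySem.List.pyRange (i + 1) (modules.length : Int) 1).foldl (fun pairs j =>
      let a := PySem.List.pyGetD modules i []
      let b := PySem.List.pyGetD modules j []
      if (PySem.Dict.mk a).get? "project" = (PySem.Dict.mk b).get? "project" then
        pairs ++ [(a, b)]
      else pairs) pairs) []

-- ===== PORT B =====
-- m["project"] (always present under Pre_; where Python would raise KeyError the input is outside Pre_)
def pvProj (m : List (String × String)) : String :=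
  ((PySem.Dict.mk m).get? "project").getD ""

def choose_pairs_alt (modules : List (List (String × String))) : List ((List (String × String)) × (List (String × String))) :=
  if modules.length < 2 then []
  else
    let index := (PySem.List.enumerate modules 0).foldl
      (fun d p => d.modify (pvProj p.2) [] (fun l => l ++ [p.1])) PySem.Dict.empty
    (PySem.List.enumerate modules 0).foldl (fun pairs p =>
      (index.getD (pvProj p.2) []).foldl (fun pairs j =>
        if p.1 < j then pairs ++ [(p.2, PySem.List.pyGetD modules j [])] else pairs) pairs) []

-- ===== PRECONDITION & SPEC =====
-- Pre_ excludes exactly the inputs where Python A raises KeyError: some module lacking a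
-- "project" key while there are at least two modules (with fewer than two modules A returns []).
def Pre_choose_pairs (modules : List (List (String × String))) : Prop :=
  modules.length < 2 ∨ ∀ m ∈ modules, (PySem.Dict.mk m).contains "project" = true
instance (modules : List (List (String × String))) : Decidable (Pre_choose_pairs modules) := by
  unfold Pre_choose_pairs; infer_instance

def pvWitness_choose_pairs : (List (List (String × String))) :=
  [[("project", "p"), ("name", "a")], [("project", "p"), ("name", "b")], [("project", "q")]]

def Spec_choose_pairs (modules : List (List (String × String))) (out : List ((List (String × String)) × (List (String × String)))) : Prop := out = choose_pairs_alt modules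
instance (modules : List (List (String × String))) (out : List ((List (String × String)) × (List (String × String)))) : Decidable (Spec_choose_pairs modules out) := by unfold Spec_choose_pairs; infer_instance

-- ===== CLAIM (what is proved, stated in full; the proofs are below) =====
def Claim_equal_choose_pairs : Prop := ∀ (modules : List (List (String × String))), Dom_choose_pairs modules → Pre_choose_pairs modules → Spec_choose_pairs modules (choose_pairs modules)

-- ===== LEMMAS AND PROOFS =====

-- A rewritten as a flatMap of filtered ranges
theorem A_flat (modules : List (List (String × String))) :
    choose_pairs modules =
      (PySem.List.pyRange 0 (modules.length : Int) 1).flatMap (fun i =>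
        ((PySem.List.pyRange (i + 1) (modules.length : Int) 1).filter (fun j =>
          decide ((PySem.Dict.mk (PySem.List.pyGetD modules i [])).get? "project"
            = (PySem.Dict.mk (PySem.List.pyGetD modules j [])).get? "project"))).map
          (fun j => (PySem.List.pyGetD modules i [], PySem.List.pyGetD modules j []))) := by
  unfold choose_pairs
  simp only [PySem.List.foldl_append_ite, PySem.List.foldl_append_eq_flatMap, List.nil_append]

theorem A_small (modules : List (List (String × String))) (h : modules.length < 2) :
    choose_pairs modules = [] := by
  rw [A_flat]
  match modules, h with
  | [], _ => decide
  | [m], _ =>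
    rw [show (([m] : List (List (String × String))).length : Int) = 1 from by simp]
    rw [show PySem.List.pyRange 0 1 1 = [0] from by decide]
    simp

-- what the grouping dict holds at key c
theorem index_getD_gen (l : List (Int × List (String × String))) (d : PySem.Dict String (List Int)) (c : String) :
    ((l.foldl (fun d p => d.modify (pvProj p.2) [] (fun t => t ++ [p.1])) d).getD c []) =
    d.getD c [] ++ (l.filter (fun p => pvProj p.2 == c)).map (fun p => p.1) := by
  induction l generalizing d with
  | nil => simp
  | cons p l ih =>
    simp only [List.foldl_cons, ih, List.filter_cons]
    rw [PySem.Dict.getD_modify]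
    by_cases h : c = pvProj p.2
    · simp [h, List.append_assoc]
    · have h2 : ¬ (pvProj p.2 == c) = true := by
        simp only [beq_iff_eq]; exact fun e => h e.symm
      simp [h, h2]

-- B rewritten as a flatMap of filtered ranges
theorem B_flat (modules : List (List (String × String))) (h : ¬ modules.length < 2) :
    choose_pairs_alt modules =
      (PySem.List.pyRange 0 (modules.length : Int) 1).flatMap (fun i =>
        (((PySem.List.pyRange 0 (modules.length : Int) 1).filter (fun j =>
            (pvProj (PySem.List.pyGetD modules j []) == pvProj (PySem.List.pyGetD modules i []))
            && decide (i < j))).map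
          (fun j => (PySem.List.pyGetD modules i [], PySem.List.pyGetD modules j [])))) := by
  unfold choose_pairs_alt
  rw [if_neg h]
  simp only [index_getD_gen]
  simp only [PySem.List.foldl_append_ite, PySem.List.foldl_append_eq_flatMap, List.nil_append]
  rw [PySem.List.enumerate_eq_map_pyRange modules []]
  rw [List.flatMap_map]
  simp only [PySem.Dict.getD_empty, List.nil_append, List.filter_map, List.map_map,
    Function.comp_def, List.filter_filter, PySem.List.len_eq]
  refine congrArg List.flatten (List.map_congr_left ?_) |>.trans (List.flatMap_def).symm |> (List.flatMap_def.trans ·)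
  intro i hi
  exact congrArg _ (List.filter_congr (fun x _ => Bool.and_comm _ _))

theorem proj_some (modules : List (List (String × String)))
    (h2 : ∀ m ∈ modules, (PySem.Dict.mk m).contains "project" = true)
    {j : Int} (h0 : 0 ≤ j) (h1 : j < (modules.length : Int)) :
    (PySem.Dict.mk (PySem.List.pyGetD modules j [])).get? "project"
      = some (pvProj (PySem.List.pyGetD modules j [])) := by
  have hm : PySem.List.pyGetD modules j [] ∈ modules := by
    rw [PySem.List.pyGetD_eq_getElem modules [] h0 h1]
    exact List.getElem_mem _
  have hc := h2 _ hm
  rcases ho : (PySem.Dict.mk (PySem.List.pyGetD modules j [])).get? "project" with _ | v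
  · rw [(PySem.Dict.get?_eq_none_iff_contains _ _).mp ho] at hc; cases hc
  · simp [pvProj, ho]

theorem main_eq (modules : List (List (String × String)))
    (h2 : ∀ m ∈ modules, (PySem.Dict.mk m).contains "project" = true)
    (h : ¬ modules.length < 2) :
    choose_pairs modules = choose_pairs_alt modules := by
  rw [A_flat, B_flat modules h]
  rw [List.flatMap_def, List.flatMap_def]
  refine congrArg List.flatten (List.map_congr_left ?_)
  intro i hi
  rw [PySem.List.mem_pyRange_one] at hi
  refine congrArg _ ?_
  -- split B's full range at i+1; the prefix dies on the i < j test
  rw [PySem.List.pyRange_one_append 0 (i+1) (modules.length : Int) (by omega) (by omega)]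
  rw [List.filter_append]
  have hnil : (PySem.List.pyRange 0 (i+1) 1).filter (fun j =>
      (pvProj (PySem.List.pyGetD modules j []) == pvProj (PySem.List.pyGetD modules i []))
      && decide (i < j)) = [] := by
    rw [List.filter_eq_nil_iff]
    intro j hj
    rw [PySem.List.mem_pyRange_one] at hj
    simp only [Bool.and_eq_true, decide_eq_true_eq, not_and]
    intro _; omega
  rw [hnil, List.nil_append]
  refine List.filter_congr ?_
  intro j hj
  rw [PySem.List.mem_pyRange_one] at hj
  have hji : i < j := by omega
  rw [proj_some modules h2 (by omega) hi.2, proj_some modules h2 (by omega) hj.2]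
  simp only [hji, decide_true, Bool.and_true]
  rw [Bool.eq_iff_iff, beq_iff_eq, decide_eq_true_eq]
  rw [Option.some_inj]; exact eq_comm

-- ===== VERDICT (by name: the statement is the Claim_ definition above) =====
theorem choose_pairs_spec : Claim_equal_choose_pairs := by
  intro modules _ hpre
  unfold Spec_choose_pairs
  by_cases h : modules.length < 2
  · rw [A_small modules h]
    unfold choose_pairs_alt
    rw [if_pos h]
  · rcases hpre with hlt | h2
    · exact absurd hlt h
    · exact main_eq modules h2 h
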